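-- pv_equiv track=rewrite | github.com/Org-EthereaLogic/DocDevAI-v3.0.0 | devdocai/quality/dimensions.py | _check_whitespace
-- ===== SOURCE A (Python) =====
-- from typing import Dict, List, Tuple, Optional, Set
--
-- def _check_whitespace(content: str) -> List[str]:
--     """Check for whitespace issues."""
--     issues = []
--     lines = content.split('\n')
--
--     # Check for trailing whitespace
--     trailing = sum(1 for line in lines if line.rstrip() != line)
--     if trailing > 0:
--         issues.append(f"{trailing} lines with trailing whitespace")
--
--     # Check for multiple blank lines
--     blank_count = 0
--     max_blank = 0
--     for line in lines:
--         if not line.strip():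
--             blank_count += 1
--             max_blank = max(max_blank, blank_count)
--         else:
--             blank_count = 0
--
--     if max_blank > 2:
--         issues.append(f"Multiple consecutive blank lines ({max_blank})")
--
--     return issues
-- ===== SOURCE B (Python) =====
-- from itertools import groupby
--
-- def _check_whitespace(content):
--     """Check for whitespace issues (run-based re-implementation)."""
--     issues = []
--     lines = content.split('\n')
--
--     trailing = sum(1 for line in lines if line != line.rstrip())
--     if trailing > 0:
--         issues.append(f"{trailing} lines with trailing whitespace")
--
--     max_blank = max((sum(1 for _ in g)
--                      for blank, g in groupby(lines, key=lambda l: not l.strip())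
--                      if blank), default=0)
--     if max_blank > 2:
--         issues.append(f"Multiple consecutive blank lines ({max_blank})")
--
--     return issues
-- ===== Notes on version B (the rewrite author's own statement) =====
-- stated objective: alternative
-- what changed: The stateful running-counter scan for consecutive blank lines is replaced by itertools.groupby: lines are grouped into maximal runs by blankness and max_blank is the maximum length of a blank run (max(..., default=0)); the trailing-whitespace count stays a comprehension sum.
import Mathlib
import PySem

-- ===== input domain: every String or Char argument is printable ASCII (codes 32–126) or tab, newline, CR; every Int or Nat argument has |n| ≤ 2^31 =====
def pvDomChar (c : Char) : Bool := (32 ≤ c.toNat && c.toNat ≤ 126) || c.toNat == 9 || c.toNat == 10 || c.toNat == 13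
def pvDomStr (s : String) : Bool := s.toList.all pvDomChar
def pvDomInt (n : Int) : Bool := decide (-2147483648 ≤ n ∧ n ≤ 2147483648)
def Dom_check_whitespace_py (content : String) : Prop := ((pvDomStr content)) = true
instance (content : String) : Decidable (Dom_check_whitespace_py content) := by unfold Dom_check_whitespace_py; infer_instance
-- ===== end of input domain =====

-- B replaces A's running-counter scan for consecutive blank lines with a group-runs-then-take-max
-- decomposition (itertools.groupby); same messages, same order. Return-value equivalence only (no mutation).

-- ===== PORT A =====
-- 'not line.strip()' (Python truthiness of the stripped line)
def pvIsBlank (l : String) : Bool := PySem.Str.strip l == ""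

def check_whitespace_py (content : String) : List String :=
  let lines := (PySem.Str.split? content "\n").getD []
  let trailing : Int :=
    lines.foldl (fun acc l => if PySem.Str.rstrip l ≠ l then acc + 1 else acc) 0
  let issues : List String :=
    if trailing > 0 then [PySem.Int.toStr trailing ++ " lines with trailing whitespace"] else []
  -- running-counter scan: state (blank_count, max_blank)
  let st := lines.foldl
    (fun (p : Int × Int) l => if pvIsBlank l then (p.1 + 1, max p.2 (p.1 + 1)) else (0, p.2))
    (0, 0)
  if st.2 > 2 then
    issues ++ ["Multiple consecutive blank lines (" ++ PySem.Int.toStr st.2 ++ ")"]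
  else issues

-- ===== PORT B =====
-- groupby(lines, key=blank): lengths of the maximal blank runs (a run in progress carries its length n)
def pvRunsAux (b : Bool) (n : Int) : List String → List Int
  | [] => if b then [n] else []
  | l :: ls =>
      if pvIsBlank l = b then pvRunsAux b (n + 1) ls
      else (if b then [n] else []) ++ pvRunsAux (pvIsBlank l) 1 ls

-- max(blank-run lengths, default=0)
def pvMaxBlank : List String → Int
  | [] => 0
  | l :: ls => (pvRunsAux (pvIsBlank l) 1 ls).foldl max 0

def check_whitespace_py_alt (content : String) : List String :=
  let lines := (PySem.Str.split? content "\n").getD []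
  let trailing : Int :=
    lines.foldl (fun acc l => if l ≠ PySem.Str.rstrip l then acc + 1 else acc) 0
  let issues : List String :=
    if trailing > 0 then [PySem.Int.toStr trailing ++ " lines with trailing whitespace"] else []
  let mb := pvMaxBlank lines
  if mb > 2 then
    issues ++ ["Multiple consecutive blank lines (" ++ PySem.Int.toStr mb ++ ")"]
  else issues

-- ===== PRECONDITION & SPEC =====
def Spec_check_whitespace_py (content : String) (out : List String) : Prop := out = check_whitespace_py_alt content
instance (content : String) (out : List String) : Decidable (Spec_check_whitespace_py content out) := by unfold Spec_check_whitespace_py; infer_instance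

-- ===== CLAIM (what is proved, stated in full; the proofs are below) =====
def Claim_equal_check_whitespace_py : Prop := ∀ (content : String), Dom_check_whitespace_py content → Spec_check_whitespace_py content (check_whitespace_py content)

-- ===== LEMMAS AND PROOFS =====

-- the two trailing-whitespace counts agree (the Ne is just flipped)
theorem pvTrailing_eq (lines : List String) (acc : Int) :
    lines.foldl (fun acc l => if PySem.Str.rstrip l ≠ l then acc + 1 else acc) acc
      = lines.foldl (fun acc l => if l ≠ PySem.Str.rstrip l then acc + 1 else acc) acc := by
  induction lines generalizing acc with
  | nil => rfl
  | cons l ls ih =>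
      simp only [List.foldl_cons]
      rw [show (if PySem.Str.rstrip l ≠ l then acc + 1 else acc)
            = (if l ≠ PySem.Str.rstrip l then acc + 1 else acc) from if_congr ne_comm rfl rfl]
      exact ih _

-- the max blank-count reached while scanning ls, the current run already being bc long
def pvG (bc : Int) : List String → Int
  | [] => 0
  | l :: ls => if pvIsBlank l then max (bc + 1) (pvG (bc + 1) ls) else pvG 0 ls

theorem pvG_nonneg (ls : List String) (bc : Int) : 0 ≤ pvG bc ls := by
  induction ls generalizing bc with
  | nil => simp [pvG]
  | cons l ls ih =>
      simp only [pvG]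
      split
      · have := ih (bc + 1); omega
      · exact ih 0

theorem pvFoldA (ls : List String) (bc mb : Int) (h : 0 ≤ mb) :
    (ls.foldl (fun (p : Int × Int) l =>
        if pvIsBlank l then (p.1 + 1, max p.2 (p.1 + 1)) else (0, p.2)) (bc, mb)).2
      = max mb (pvG bc ls) := by
  induction ls generalizing bc mb with
  | nil => simp [pvG]; omega
  | cons l ls ih =>
      simp only [List.foldl_cons, pvG]
      by_cases hb : pvIsBlank l
      · simp only [hb, if_true]
        rw [ih (bc + 1) (max mb (bc + 1)) (by omega)]
        omega
      · simp only [hb]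
        exact ih 0 mb h

theorem pvFoldMax (l : List Int) (a b : Int) :
    l.foldl max (max a b) = max a (l.foldl max b) := by
  induction l generalizing a b with
  | nil => rfl
  | cons x xs ih =>
      simp only [List.foldl_cons, max_assoc]
      exact ih a (max b x)

theorem pvRuns_spec (ls : List String) :
    (∀ n : Int, 1 ≤ n →
        (pvRunsAux true n ls).foldl max 0 = max n (pvG n ls)) ∧
    (∀ n : Int, (pvRunsAux false n ls).foldl max 0 = pvG 0 ls) := by
  induction ls with
  | nil =>
      constructor
      · intro n hn; simp [pvRunsAux, pvG]; omega
      · intro n; simp [pvRunsAux, pvG]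
  | cons l ls ih =>
      obtain ⟨ih1, ih2⟩ := ih
      constructor
      · intro n hn
        simp only [pvRunsAux, pvG]
        by_cases hb : pvIsBlank l
        · rw [hb, if_pos rfl, if_pos rfl, ih1 (n + 1) (by omega)]
          omega
        · rw [show pvIsBlank l = false from by simpa using hb]
          simp only [Bool.false_eq_true, if_false, if_true,
            List.singleton_append, List.foldl_cons]
          rw [show (max 0 n) = max n 0 from max_comm 0 n, pvFoldMax, ih2 1]
      · intro n
        simp only [pvRunsAux, pvG]
        by_cases hb : pvIsBlank l
        · rw [hb]
          simp only [Bool.true_eq_false, Bool.false_eq_true, if_false, if_true, List.nil_append]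
          rw [ih1 1 (by omega)]
          norm_num
        · rw [show pvIsBlank l = false from by simpa using hb]
          simp only [Bool.false_eq_true, if_false, if_true]
          exact ih2 (n + 1)

theorem pvMaxBlank_eq_pvG (lines : List String) : pvMaxBlank lines = pvG 0 lines := by
  cases lines with
  | nil => rfl
  | cons l ls =>
      simp only [pvMaxBlank, pvG]
      by_cases hb : pvIsBlank l
      · rw [hb, (pvRuns_spec ls).1 1 (by omega)]
        simp
      · rw [show pvIsBlank l = false from by simpa using hb, (pvRuns_spec ls).2 1]
        simp

theorem pvMain (lines : List String) :
    (if (lines.foldl (fun (p : Int × Int) l =>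
          if pvIsBlank l then (p.1 + 1, max p.2 (p.1 + 1)) else (0, p.2)) (0, 0)).2 > 2 then
       (if (lines.foldl (fun acc l => if PySem.Str.rstrip l ≠ l then acc + 1 else acc) (0 : Int)) > 0 then
          [PySem.Int.toStr (lines.foldl (fun acc l => if PySem.Str.rstrip l ≠ l then acc + 1 else acc) (0 : Int))
             ++ " lines with trailing whitespace"] else [])
         ++ ["Multiple consecutive blank lines ("
               ++ PySem.Int.toStr (lines.foldl (fun (p : Int × Int) l =>
                     if pvIsBlank l then (p.1 + 1, max p.2 (p.1 + 1)) else (0, p.2)) (0, 0)).2 ++ ")"]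
     else
       (if (lines.foldl (fun acc l => if PySem.Str.rstrip l ≠ l then acc + 1 else acc) (0 : Int)) > 0 then
          [PySem.Int.toStr (lines.foldl (fun acc l => if PySem.Str.rstrip l ≠ l then acc + 1 else acc) (0 : Int))
             ++ " lines with trailing whitespace"] else []))
    =
    (if pvMaxBlank lines > 2 then
       (if (lines.foldl (fun acc l => if l ≠ PySem.Str.rstrip l then acc + 1 else acc) (0 : Int)) > 0 then
          [PySem.Int.toStr (lines.foldl (fun acc l => if l ≠ PySem.Str.rstrip l then acc + 1 else acc) (0 : Int))
             ++ " lines with trailing whitespace"] else [])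
         ++ ["Multiple consecutive blank lines (" ++ PySem.Int.toStr (pvMaxBlank lines) ++ ")"]
     else
       (if (lines.foldl (fun acc l => if l ≠ PySem.Str.rstrip l then acc + 1 else acc) (0 : Int)) > 0 then
          [PySem.Int.toStr (lines.foldl (fun acc l => if l ≠ PySem.Str.rstrip l then acc + 1 else acc) (0 : Int))
             ++ " lines with trailing whitespace"] else [])) := by
  rw [pvTrailing_eq lines 0, pvFoldA lines 0 0 le_rfl, ← pvMaxBlank_eq_pvG]
  have h0 : 0 ≤ pvMaxBlank lines := by rw [pvMaxBlank_eq_pvG]; exact pvG_nonneg lines 0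
  rw [show max (0 : Int) (pvMaxBlank lines) = pvMaxBlank lines from by omega]

-- ===== VERDICT (by name: the statement is the Claim_ definition above) =====
theorem check_whitespace_py_spec : Claim_equal_check_whitespace_py := by
  intro content _
  show check_whitespace_py content = check_whitespace_py_alt content
  exact pvMain ((PySem.Str.split? content "\n").getD [])
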